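-- pv_equiv track=rewrite | github.com/W-CodeTest-Study/23-CodeTest-Study | Hcmins/p43238.py | solution
-- ===== SOURCE A (Python) =====
-- def solution(n, times):
--     # times배열에 숫자분배, n을 숫자분배해서 가장 작은 값 구하기
--     # 현재 케이스는 4,2로 분배한 상태에서 가장 큰 값이 answer후보 중 가장 작은 값이 answer
--     # answer//10=2=20, answer//7=4=28 이 중 큰거 28
--     # n을 분배하는 기준을 모르겠당...ㅎㅎ -> 노가다로
--
--     times.sort()
--     count_table = [0 for i in range(len(times))]
--     temp_table = [0 for i in range(len(times))]  # 임시 count테이블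
--
--     candidate = [0 for i in range(len(times))]  # 임시테이블을 통해 구한 최대시간을 넣음
--     arr = []
--     # n이 1일때부터 최선의 방법으로 올라가기
--     for num in range(1, n+1):
--
--         # 그냥 심사국 i번째부터 일일이 다 들어가서 그거의 최선선택
--         for i in range(len(times)):
--             # 임시테이블은 이전 채택된 테이블로 최신화
--             for k in range(len(times)):
--                 temp_table[k] = count_table[k]
--
--             temp_table[i] += 1  # 순서대로 1씩넣기
--
--             # 각 들어갔을때 걸리는 시간 구하고 후보테이블에 저장
--             arr = []
--             for j in range(len(times)):
--                 arr.append(temp_table[j]*times[j])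
--             candidate[i] = max(arr)
--
--         # 최대시간중 최소값인 index찾아서 그걸로 채택
--         count_table[candidate.index(min(candidate))] += 1
--
--     answers = []
--     for i in range(len(times)):
--         answers.append(count_table[i]*times[i])
--
--     answer = max(answers)
--
--     return answer
-- ===== SOURCE B (Python) =====
-- def solution(n, times):
--     # Same greedy assignment, but O(m) per person instead of A's O(m^2):
--     # keep the products counts[j]*times[j]; the max over "all products with slot i
--     # bumped" is computed from the running max, its first index, and the max of the
--     # remaining products (second max), instead of rebuilding a temp table per slot.
--     times.sort()
--     m = len(times)
--     counts = [0] * m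
--     for _ in range(n):
--         prods = [counts[j] * times[j] for j in range(m)]
--         b1, i1, b2 = prods[0], 0, None
--         for j in range(1, m):
--             if prods[j] > b1:
--                 b2, b1, i1 = b1, prods[j], j
--             elif b2 is None or prods[j] > b2:
--                 b2 = prods[j]
--         best_i, best_v = 0, None
--         for i in range(m):
--             v = (counts[i] + 1) * times[i]
--             other = b2 if i == i1 else b1
--             if other is not None and other > v:
--                 v = other
--             if best_v is None or v < best_v:
--                 best_i, best_v = i, v
--         counts[best_i] += 1
--     return max(counts[j] * times[j] for j in range(m))
-- ===== Notes on version B (the rewrite author's own statement) =====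
-- stated objective: faster
-- what changed: A rebuilds a temp count table and recomputes every product for each of the m slots of each of the n people (O(m^2) per person); B keeps the product list once per person and derives each slot's makespan from the running maximum, its first index and the second maximum, plus a single argmin scan (O(m) per person).
import Mathlib
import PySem

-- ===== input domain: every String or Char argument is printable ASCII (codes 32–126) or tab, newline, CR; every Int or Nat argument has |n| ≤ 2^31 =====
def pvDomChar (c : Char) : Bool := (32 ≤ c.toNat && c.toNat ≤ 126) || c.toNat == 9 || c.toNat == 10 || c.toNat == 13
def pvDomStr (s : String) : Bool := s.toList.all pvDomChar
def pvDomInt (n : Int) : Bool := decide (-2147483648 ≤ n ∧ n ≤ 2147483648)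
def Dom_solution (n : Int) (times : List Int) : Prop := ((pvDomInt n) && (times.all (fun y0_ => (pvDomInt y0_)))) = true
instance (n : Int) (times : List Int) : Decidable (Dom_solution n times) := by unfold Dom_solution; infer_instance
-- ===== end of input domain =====

-- B runs the same greedy in O(n·m) instead of A's O(n·m²): per person it keeps the product list,
-- the running max / its first index / the second max, and a single argmin scan, instead of
-- rebuilding a temp table and all products for every slot.
-- Both A and B sort `times` in place (the caller-visible side effect is identical);
-- the equivalence proved here is about the return value.

-- ===== PORT A =====

-- Python max(xs) (no key): first maximal element; raises ValueError on [] (excluded by Pre_), default 0 here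
def pyMaxD (xs : List Int) : Int := (PySem.List.max? xs (fun x => x)).getD 0

-- the body of A's outer `for num in range(1, n+1)` loop: temp_table/candidate/arr are fully
-- rewritten on every pass, so the loop state is count_table alone
def stepA (ts count : List Int) : List Int :=
  let m : Int := ts.length
  -- for i in range(len(times)): copy count_table into temp_table, temp_table[i] += 1,
  -- arr = [temp_table[j]*times[j] …], candidate[i] = max(arr)
  let candidate : List Int := (PySem.List.pyRange 0 m 1).map (fun i =>
    let temp := (PySem.List.pyRange 0 m 1).map (fun k => PySem.List.pyGetD count k 0)
    let temp := PySem.List.pySetD temp i (PySem.List.pyGetD temp i 0 + 1)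
    let arr := (PySem.List.pyRange 0 m 1).map (fun j =>
      PySem.List.pyGetD temp j 0 * PySem.List.pyGetD ts j 0)
    pyMaxD arr)
  -- count_table[candidate.index(min(candidate))] += 1   (min of [] would raise: excluded by Pre_)
  let idx : Nat := (PySem.List.index? candidate ((PySem.List.min? candidate (fun x => x)).getD 0)).getD 0
  PySem.List.pySetD count (idx : Int) (PySem.List.pyGetD count (idx : Int) 0 + 1)

def solution (n : Int) (times : List Int) : Int :=
  let ts := PySem.List.sorted times (fun x => x) false   -- times.sort()
  let m : Int := ts.length
  let count0 : List Int := (PySem.List.pyRange 0 m 1).map (fun _ => 0)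
  let count := (PySem.List.pyRange 1 (n + 1) 1).foldl (fun c _ => stepA ts c) count0
  let answers := (PySem.List.pyRange 0 m 1).map (fun i =>
    PySem.List.pyGetD count i 0 * PySem.List.pyGetD ts i 0)
  pyMaxD answers

-- ===== PORT B =====

-- one round of B: products once, running max b1 with first index i1 and second max b2,
-- then a single argmin scan; None is Option.none
-- body of `for j in range(1, m)`: update (b1, i1, b2)
def stepB_scan1 (prods : List Int) (st : Int × Int × Option Int) (j : Int) :
    Int × Int × Option Int :=
  let pj := PySem.List.pyGetD prods j 0
  if pj > st.1 then (pj, j, some st.1)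
  else  -- elif b2 is None or prods[j] > b2 (short-circuit or, as a match)
    match st.2.2 with
    | none => (st.1, st.2.1, some pj)
    | some v => if pj > v then (st.1, st.2.1, some pj) else (st.1, st.2.1, some v)

-- body of `for i in range(m)`: update (best_i, best_v)
def stepB_scan2 (count ts : List Int) (st1 : Int × Int × Option Int)
    (st : Int × Option Int) (i : Int) : Int × Option Int :=
  let v := (PySem.List.pyGetD count i 0 + 1) * PySem.List.pyGetD ts i 0
  let v := match (if i == st1.2.1 then st1.2.2 else some st1.1) with
    | none => v
    | some o => if o > v then o else v   -- other is not None and other > v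
  match st.2 with
  | none => (i, some v)
  | some bv => if v < bv then (i, some v) else st

def stepB (ts count : List Int) : List Int :=
  let m : Int := ts.length
  let prods := (PySem.List.pyRange 0 m 1).map (fun j =>
    PySem.List.pyGetD count j 0 * PySem.List.pyGetD ts j 0)
  -- b1, i1, b2 = prods[0], 0, None
  let st1 := (PySem.List.pyRange 1 m 1).foldl (stepB_scan1 prods)
    (PySem.List.pyGetD prods 0 0, 0, none)
  -- best_i, best_v = 0, None
  let st2 := (PySem.List.pyRange 0 m 1).foldl (stepB_scan2 count ts st1) (0, none)
  PySem.List.pySetD count st2.1 (PySem.List.pyGetD count st2.1 0 + 1)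

def solution_alt (n : Int) (times : List Int) : Int :=
  let ts := PySem.List.sorted times (fun x => x) false   -- times.sort()
  let m : Int := ts.length
  let counts := List.replicate ts.length (0 : Int)       -- [0] * m
  let counts := (PySem.List.pyRange 0 n 1).foldl (fun c _ => stepB ts c) counts
  -- max(counts[j] * times[j] for j in range(m))  (raises on an empty sequence: excluded by Pre_)
  pyMaxD ((PySem.List.pyRange 0 m 1).map (fun j =>
    PySem.List.pyGetD counts j 0 * PySem.List.pyGetD ts j 0))

-- ===== PRECONDITION & SPEC =====
-- Pre_ excludes only the empty list, on which both Pythons raise (A: min()/max() of an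
-- empty sequence, B: prods[0] / max() of an empty sequence).
def Pre_solution (n : Int) (times : List Int) : Prop := times ≠ []
instance (n : Int) (times : List Int) : Decidable (Pre_solution n times) := by
  unfold Pre_solution; infer_instance

def pvWitness_solution : Int × List Int := (6, [7, 10])

def Spec_solution (n : Int) (times : List Int) (out : Int) : Prop := out = solution_alt n times
instance (n : Int) (times : List Int) (out : Int) : Decidable (Spec_solution n times out) := by
  unfold Spec_solution; infer_instance

-- ===== CLAIM (what is proved, stated in full; the proofs are below) =====
def Claim_equal_solution : Prop := ∀ (n : Int) (times : List Int), Dom_solution n times → Pre_solution n times → Spec_solution n times (solution n times)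

-- ===== LEMMAS AND PROOFS =====

-- ===== helpers =====
lemma pyMaxD_mem {xs : List Int} (h : xs ≠ []) : pyMaxD xs ∈ xs := by
  unfold pyMaxD
  cases hm : PySem.List.max? xs (fun x => x) with
  | none => exact absurd ((PySem.List.max?_eq_none_iff xs _).mp hm) h
  | some m => simpa using PySem.List.max?_mem hm

lemma pyMaxD_isMax {xs : List Int} (h : xs ≠ []) : ∀ x ∈ xs, x ≤ pyMaxD xs := by
  unfold pyMaxD
  cases hm : PySem.List.max? xs (fun x => x) with
  | none => exact absurd ((PySem.List.max?_eq_none_iff xs _).mp hm) h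
  | some m => simpa using PySem.List.max?_isMax hm

lemma pyMaxD_eq_of {xs : List Int} {v : Int} (h : xs ≠ []) (hv : v ∈ xs)
    (hub : ∀ x ∈ xs, x ≤ v) : pyMaxD xs = v :=
  le_antisymm (hub _ (pyMaxD_mem h)) (pyMaxD_isMax h v hv)

lemma getD_set_lt {c : List Int} {j : Nat} (hj : j < c.length) (v : Int) (i : Nat) :
    (c.set j v).getD i 0 = if i = j then v else c.getD i 0 := by
  simp only [List.getD_eq_getElem?_getD, List.getElem?_set]
  rcases eq_or_ne i j with rfl | hne
  · simp [hj]
  · simp [Ne.symm hne, hne]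

lemma map_getD_range' {c : List Int} {n : Nat} (h : c.length = n) :
    (List.range n).map (fun i => c.getD i 0) = c := by
  subst h
  apply List.ext_getElem
  · simp
  · intro i h1 h2
    simp [List.getElem?_eq_getElem h2]

lemma getD_map_range_lt {f : Nat → Int} {m j : Nat} (h : j < m) :
    ((List.range m).map f).getD j 0 = f j := by
  rw [List.getD_eq_getElem?_getD]
  simp [h]

-- the per-slot greedy quantities
def pv (ts c : List Int) (j : Nat) : Int := c.getD j 0 * ts.getD j 0
def nxt (ts c : List Int) (i : Nat) : Int := (c.getD i 0 + 1) * ts.getD i 0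
-- the product list with slot i bumped (A's `arr` for index i)
def updL (ts c : List Int) (i : Nat) : List Int :=
  (List.range ts.length).map (fun j => if j = i then nxt ts c i else pv ts c j)
-- A's candidate value for slot i
def gfun (ts c : List Int) (i : Nat) : Int := pyMaxD (updL ts c i)
def candL (ts c : List Int) : List Int := (List.range ts.length).map (gfun ts c)
-- the slot both programs pick: first index of the minimum of candL
def chooseIdx (ts c : List Int) : Nat :=
  (PySem.List.index? (candL ts c)
    ((PySem.List.min? (candL ts c) (fun x => x)).getD 0)).getD 0

lemma candL_ne_nil {ts c : List Int} (hne : ts ≠ []) : candL ts c ≠ [] := by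
  unfold candL
  simpa using List.length_pos_iff.mp (by simpa using List.length_pos_iff.mpr hne)

-- A's step picks chooseIdx
lemma stepA_eq_choose {ts c : List Int} (hlen : c.length = ts.length) :
    stepA ts c = c.set (chooseIdx ts c) (c.getD (chooseIdx ts c) 0 + 1) := by
  have h0 : (PySem.List.pyRange 0 (ts.length : Int) 1).map
      (fun k => PySem.List.pyGetD c k 0) = c := by
    rw [← hlen]
    exact PySem.List.map_pyGetD_pyRange_zero' c 0
  have hcand : (PySem.List.pyRange 0 (ts.length : Int) 1).map (fun i =>
      let temp := (PySem.List.pyRange 0 (ts.length : Int) 1).map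
        (fun k => PySem.List.pyGetD c k 0)
      let temp := PySem.List.pySetD temp i (PySem.List.pyGetD temp i 0 + 1)
      let arr := (PySem.List.pyRange 0 (ts.length : Int) 1).map (fun j =>
        PySem.List.pyGetD temp j 0 * PySem.List.pyGetD ts j 0)
      pyMaxD arr)
      = candL ts c := by
    simp only [PySem.List.pyRange_zero_natCast, List.map_map, Function.comp_def,
      PySem.List.pyGetD_natCast, PySem.List.pySetD_natCast, map_getD_range' hlen]
    unfold candL
    apply List.map_congr_left
    intro i hi
    have hic : i < c.length := by rw [hlen]; exact List.mem_range.mp hi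
    unfold gfun updL
    congr 1
    apply List.map_congr_left
    intro j _
    rw [getD_set_lt hic]
    unfold nxt pv
    split_ifs with hji
    · subst hji; rfl
    · rfl
  unfold stepA
  simp only [hcand]
  unfold chooseIdx
  simp only [PySem.List.pySetD_natCast, PySem.List.pyGetD_natCast]

-- chooseIdx is the first argmin of gfun on [0, ts.length)
lemma chooseIdx_spec {ts c : List Int} (hne : ts ≠ []) :
    chooseIdx ts c < ts.length ∧
      (∀ j < ts.length, gfun ts c (chooseIdx ts c) ≤ gfun ts c j) ∧
      (∀ j < chooseIdx ts c, gfun ts c (chooseIdx ts c) < gfun ts c j) := by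
  obtain ⟨mv, hmv⟩ : ∃ mv, PySem.List.min? (candL ts c) (fun x => x) = some mv := by
    cases hm : PySem.List.min? (candL ts c) (fun x => x) with
    | none => exact absurd ((PySem.List.min?_eq_none_iff _ _).mp hm) (candL_ne_nil hne)
    | some m => exact ⟨m, rfl⟩
  have hmv_min : ∀ y ∈ candL ts c, mv ≤ y := by simpa using PySem.List.min?_isMin hmv
  obtain ⟨k, hk⟩ : ∃ k, PySem.List.index? (candL ts c) mv = some k :=
    Option.isSome_iff_exists.mp
      ((PySem.List.index?_isSome_iff _ mv).mpr (PySem.List.min?_mem hmv))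
  obtain ⟨hklt, hckv, hkfirst⟩ := PySem.List.getElem_of_index?_eq_some hk
  have hcl : (candL ts c).length = ts.length := by simp [candL]
  have hidx : chooseIdx ts c = k := by
    unfold chooseIdx
    rw [hmv, Option.getD_some, hk, Option.getD_some]
  have hget : ∀ (j : Nat) (hj : j < ts.length), (candL ts c)[j]'(by omega) = gfun ts c j := by
    intro j hj
    simp [candL]
  rw [hidx]
  refine ⟨by omega, ?_, ?_⟩
  · intro j hj
    have := hmv_min _ (List.mem_map.mpr ⟨j, List.mem_range.mpr hj, rfl⟩)
    rw [← hget k (by omega), hckv]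
    exact this
  · intro j hj
    have hjlt : j < ts.length := by omega
    have h1 := hmv_min _ (List.mem_map.mpr ⟨j, List.mem_range.mpr hjlt, rfl⟩)
    have h2 := hkfirst j hj
    rw [hget j hjlt] at h2
    rw [← hget k (by omega), hckv]
    rcases lt_or_eq_of_le h1 with h | h
    · exact h
    · exact absurd h.symm h2

-- invariant of B's first scan after processing indices 1..K-1
def Spec1 (ts c : List Int) (K : Nat) (st : Int × Int × Option Int) : Prop :=
  ∃ i1 : Nat, st.2.1 = (i1 : Int) ∧ i1 < K ∧ pv ts c i1 = st.1 ∧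
    (∀ j < K, pv ts c j ≤ st.1) ∧ (∀ j < i1, pv ts c j < st.1) ∧
    ((st.2.2 = none ∧ K ≤ 1) ∨
     (∃ v, st.2.2 = some v ∧ (∃ j, j < K ∧ j ≠ i1 ∧ pv ts c j = v) ∧
       (∀ j, j < K → j ≠ i1 → pv ts c j ≤ v)))

lemma loop1_spec (ts c : List Int) :
    ∀ k : Nat, k + 1 ≤ ts.length →
      Spec1 ts c (k + 1)
        ((PySem.List.pyRange 1 ((k + 1 : Nat) : Int) 1).foldl
          (stepB_scan1 ((List.range ts.length).map (pv ts c)))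
          (PySem.List.pyGetD ((List.range ts.length).map (pv ts c)) 0 0, 0, none)) := by
  intro k
  induction k with
  | zero =>
    intro h1
    rw [PySem.List.pyRange_one_eq_nil (by omega)]
    simp only [List.foldl_nil, PySem.List.pyGetD_zero, getD_map_range_lt (show 0 < ts.length by omega)]
    refine ⟨0, rfl, by omega, rfl, ?_, fun j hj => absurd hj (by omega), Or.inl ⟨rfl, by omega⟩⟩
    intro j hj
    have : j = 0 := by omega
    subst this
    exact le_refl _
  | succ k ih =>
    intro hk2
    have hk1 : k + 1 ≤ ts.length := by omega
    have hsplit : PySem.List.pyRange 1 ((k + 2 : Nat) : Int) 1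
        = PySem.List.pyRange 1 ((k + 1 : Nat) : Int) 1 ++ [((k + 1 : Nat) : Int)] := by
      have h := PySem.List.pyRange_one_succ_right (a := 1) (b := ((k + 1 : Nat) : Int)) (by push_cast; omega)
      have hcast : ((k + 2 : Nat) : Int) = ((k + 1 : Nat) : Int) + 1 := by push_cast; ring
      rw [hcast, h]
    rw [hsplit, List.foldl_append]
    obtain ⟨i1, hsti1, hi1K, hPi1, hub, hfirst, hb2⟩ := ih hk1
    set st := (PySem.List.pyRange 1 ((k + 1 : Nat) : Int) 1).foldl
      (stepB_scan1 ((List.range ts.length).map (pv ts c)))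
      (PySem.List.pyGetD ((List.range ts.length).map (pv ts c)) 0 0, 0, none) with hstdef
    simp only [List.foldl_cons, List.foldl_nil]
    unfold stepB_scan1
    rw [PySem.List.pyGetD_natCast, getD_map_range_lt (by omega)]
    by_cases hgt : pv ts c (k + 1) > st.1
    · rw [if_pos hgt]
      refine ⟨k + 1, rfl, by omega, rfl, ?_, ?_, ?_⟩
      · intro j hj
        rcases Nat.lt_or_ge j (k + 1) with h | h
        · exact le_of_lt (lt_of_le_of_lt (hub j h) hgt)
        · have : j = k + 1 := by omega
          subst this; rfl
      · intro j hj
        exact lt_of_le_of_lt (hub j hj) hgt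
      · right
        exact ⟨st.1, rfl, ⟨i1, by omega, by omega, hPi1⟩, fun j hj hne' => by
          rcases Nat.lt_or_ge j (k + 1) with h | h
          · exact hub j h
          · omega⟩
    · rw [if_neg hgt]
      have hple : pv ts c (k + 1) ≤ st.1 := by omega
      have hub' : ∀ j < k + 2, pv ts c j ≤ st.1 := by
        intro j hj
        rcases Nat.lt_or_ge j (k + 1) with h | h
        · exact hub j h
        · have : j = k + 1 := by omega
          subst this; exact hple
      rcases hb2 with ⟨hnone, hK1⟩ | ⟨v, hsome, ⟨j2, hj2K, hj2ne, hPj2⟩, hub2⟩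
      · rw [hnone]
        show Spec1 ts c (k + 1 + 1) (st.1, st.2.1, some (pv ts c (k + 1)))
        refine ⟨i1, hsti1, by omega, hPi1, hub', hfirst, Or.inr ?_⟩
        refine ⟨pv ts c (k + 1), rfl, ⟨k + 1, by omega, by omega, rfl⟩, ?_⟩
        intro j hj hji
        have : j = k + 1 := by omega
        subst this; rfl
      · rw [hsome]
        show Spec1 ts c (k + 1 + 1)
          (if pv ts c (k + 1) > v then (st.1, st.2.1, some (pv ts c (k + 1)))
           else (st.1, st.2.1, some v))
        by_cases hgt2 : pv ts c (k + 1) > v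
        · rw [if_pos hgt2]
          refine ⟨i1, hsti1, by omega, hPi1, hub', hfirst, Or.inr ?_⟩
          refine ⟨pv ts c (k + 1), rfl, ⟨k + 1, by omega, by omega, rfl⟩, ?_⟩
          intro j hj hji
          rcases Nat.lt_or_ge j (k + 1) with h | h
          · exact le_of_lt (lt_of_le_of_lt (hub2 j h hji) hgt2)
          · have : j = k + 1 := by omega
            subst this; rfl
        · rw [if_neg hgt2]
          refine ⟨i1, hsti1, by omega, hPi1, hub', hfirst, Or.inr ?_⟩
          refine ⟨v, rfl, ⟨j2, by omega, hj2ne, hPj2⟩, ?_⟩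
          intro j hj hji
          rcases Nat.lt_or_ge j (k + 1) with h | h
          · exact hub2 j h hji
          · have : j = k + 1 := by omega
            subst this; omega

lemma updL_ne_nil {ts c : List Int} (hne : ts ≠ []) (i : Nat) : updL ts c i ≠ [] := by
  unfold updL
  simpa using List.length_pos_iff.mp (by simpa using List.length_pos_iff.mpr hne)

-- B's per-slot value (from b1/i1/b2) is A's candidate value gfun
lemma scan2_value {ts c : List Int} (hne : ts ≠ []) {st1 : Int × Int × Option Int}
    (h1 : Spec1 ts c ts.length st1) {i : Nat} (hi : i < ts.length) :
    (match (if ((i : Nat) : Int) == st1.2.1 then st1.2.2 else some st1.1) with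
      | none => nxt ts c i
      | some o => if o > nxt ts c i then o else nxt ts c i) = gfun ts c i := by
  obtain ⟨i1, hsti1, hi1K, hPi1, hub, _hfirst, hb2⟩ := h1
  have hmem_nxt : nxt ts c i ∈ updL ts c i :=
    List.mem_map.mpr ⟨i, List.mem_range.mpr hi, by simp⟩
  have hmem_pv : ∀ j, j < ts.length → j ≠ i → pv ts c j ∈ updL ts c i :=
    fun j hj hji => List.mem_map.mpr ⟨j, List.mem_range.mpr hj, by rw [if_neg hji]⟩
  rw [hsti1]
  by_cases hii : i = i1
  · subst hii
    simp only [beq_self_eq_true, if_true]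
    rcases hb2 with ⟨hnone, hK1⟩ | ⟨v, hsome, ⟨j2, hj2K, hj2ne, hPj2⟩, hub2⟩
    · rw [hnone]
      show nxt ts c i = gfun ts c i
      refine (pyMaxD_eq_of (updL_ne_nil hne i) hmem_nxt ?_).symm
      intro x hx
      obtain ⟨j, hjr, rfl⟩ := List.mem_map.mp hx
      have hj := List.mem_range.mp hjr
      split_ifs with hji
      · exact le_refl _
      · omega
    · rw [hsome]
      show (if v > nxt ts c i then v else nxt ts c i) = gfun ts c i
      refine ((pyMaxD_eq_of (updL_ne_nil hne i) ?_ ?_).symm)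
      · split_ifs with hgt
        · rw [← hPj2]; exact hmem_pv j2 hj2K hj2ne
        · exact hmem_nxt
      · intro x hx
        obtain ⟨j, hjr, rfl⟩ := List.mem_map.mp hx
        have hj := List.mem_range.mp hjr
        split_ifs with hji hgt hgt
        · omega
        · exact le_refl _
        · exact hub2 j hj hji
        · exact le_trans (hub2 j hj hji) (by omega)
  · have hbeq : (((i : Nat) : Int) == ((i1 : Nat) : Int)) = false := by
      simp [hii]
    rw [hbeq]
    simp only [Bool.false_eq_true, if_false]
    show (if st1.1 > nxt ts c i then st1.1 else nxt ts c i) = gfun ts c i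
    refine ((pyMaxD_eq_of (updL_ne_nil hne i) ?_ ?_).symm)
    · split_ifs with hgt
      · rw [← hPi1]; exact hmem_pv i1 hi1K (fun h => hii h.symm)
      · exact hmem_nxt
    · intro x hx
      obtain ⟨j, hjr, rfl⟩ := List.mem_map.mp hx
      have hj := List.mem_range.mp hjr
      split_ifs with hji hgt hgt
      · omega
      · exact le_refl _
      · exact hub j hj
      · have := hub j hj; omega

-- invariant of B's second scan after processing indices 0..K-1
def Spec2 (ts c : List Int) (K : Nat) (st : Int × Option Int) : Prop :=
  ∃ bi : Nat, ∃ bv : Int, st.1 = (bi : Int) ∧ st.2 = some bv ∧ bi < K ∧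
    gfun ts c bi = bv ∧ (∀ j < K, bv ≤ gfun ts c j) ∧ (∀ j < bi, bv < gfun ts c j)

lemma loop2_spec (ts c : List Int) (hne : ts ≠ [])
    {st1 : Int × Int × Option Int} (h1 : Spec1 ts c ts.length st1) :
    ∀ k : Nat, k < ts.length →
      Spec2 ts c (k + 1)
        ((PySem.List.pyRange 0 ((k + 1 : Nat) : Int) 1).foldl
          (stepB_scan2 c ts st1) (0, none)) := by
  have hval : ∀ (st : Int × Option Int) (i : Nat), i < ts.length →
      stepB_scan2 c ts st1 st ((i : Nat) : Int) =
        (match st.2 with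
         | none => (((i : Nat) : Int), some (gfun ts c i))
         | some bv => if gfun ts c i < bv then (((i : Nat) : Int), some (gfun ts c i))
                      else st) := by
    intro st i hi
    unfold stepB_scan2
    dsimp only
    have hnxt : (PySem.List.pyGetD c ((i : Nat) : Int) 0 + 1) * PySem.List.pyGetD ts ((i : Nat) : Int) 0
        = nxt ts c i := by
      rw [PySem.List.pyGetD_natCast, PySem.List.pyGetD_natCast]
      rfl
    rw [hnxt, scan2_value hne h1 hi]
  intro k
  induction k with
  | zero =>
    intro h1'
    have : PySem.List.pyRange 0 ((1 : Nat) : Int) 1 = [((0 : Nat) : Int)] := by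
      rw [PySem.List.pyRange_zero_natCast]
      rfl
    rw [this]
    simp only [List.foldl_cons, List.foldl_nil]
    rw [hval (0, none) 0 (by omega)]
    refine ⟨0, gfun ts c 0, rfl, rfl, by omega, rfl, ?_, fun j hj => absurd hj (by omega)⟩
    intro j hj
    have hj0 : j = 0 := by omega
    rw [hj0]
  | succ k ih =>
    intro hk2
    have hsplit : PySem.List.pyRange 0 ((k + 2 : Nat) : Int) 1
        = PySem.List.pyRange 0 ((k + 1 : Nat) : Int) 1 ++ [((k + 1 : Nat) : Int)] := by
      have h := PySem.List.pyRange_one_succ_right (a := 0) (b := ((k + 1 : Nat) : Int))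
        (by omega)
      have hcast : ((k + 2 : Nat) : Int) = ((k + 1 : Nat) : Int) + 1 := by push_cast; ring
      rw [hcast, h]
    rw [hsplit, List.foldl_append]
    obtain ⟨bi, bv, hst1, hst2, hbiK, hgbi, hlb, hfirst⟩ := ih (by omega)
    set st := (PySem.List.pyRange 0 ((k + 1 : Nat) : Int) 1).foldl
      (stepB_scan2 c ts st1) (0, none) with hstdef
    simp only [List.foldl_cons, List.foldl_nil]
    rw [hval st (k + 1) (by omega), hst2]
    show Spec2 ts c (k + 1 + 1)
      (if gfun ts c (k + 1) < bv then (((k + 1 : Nat) : Int), some (gfun ts c (k + 1))) else st)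
    by_cases hlt : gfun ts c (k + 1) < bv
    · rw [if_pos hlt]
      refine ⟨k + 1, gfun ts c (k + 1), rfl, rfl, by omega, rfl, ?_, ?_⟩
      · intro j hj
        rcases Nat.lt_or_ge j (k + 1) with h | h
        · exact le_of_lt (lt_of_lt_of_le hlt (hlb j h))
        · have : j = k + 1 := by omega
          subst this; exact le_refl _
      · intro j hj
        exact lt_of_lt_of_le hlt (hlb j hj)
    · rw [if_neg hlt]
      refine ⟨bi, bv, hst1, hst2, by omega, hgbi, ?_, hfirst⟩
      intro j hj
      rcases Nat.lt_or_ge j (k + 1) with h | h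
      · exact hlb j h
      · have : j = k + 1 := by omega
        subst this; omega

lemma stepB_eq_choose {ts c : List Int} (hne : ts ≠ []) :
    stepB ts c = c.set (chooseIdx ts c) (c.getD (chooseIdx ts c) 0 + 1) := by
  have hm1 : 1 ≤ ts.length := List.length_pos_iff.mpr hne
  have hlen1 : ts.length - 1 + 1 = ts.length := by omega
  have hprods : (PySem.List.pyRange 0 (ts.length : Int) 1).map (fun j =>
      PySem.List.pyGetD c j 0 * PySem.List.pyGetD ts j 0)
      = (List.range ts.length).map (pv ts c) := by
    rw [PySem.List.pyRange_zero_natCast, List.map_map]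
    apply List.map_congr_left
    intro j _
    simp only [Function.comp_def, PySem.List.pyGetD_natCast]
    rfl
  unfold stepB
  simp only [hprods]
  have h1 : Spec1 ts c ts.length
      ((PySem.List.pyRange 1 ((ts.length : Nat) : Int) 1).foldl
        (stepB_scan1 ((List.range ts.length).map (pv ts c)))
        (PySem.List.pyGetD ((List.range ts.length).map (pv ts c)) 0 0, 0, none)) := by
    have h := loop1_spec ts c (ts.length - 1) (by omega)
    rw [hlen1] at h
    exact h
  have h2 : Spec2 ts c ts.length
      ((PySem.List.pyRange 0 ((ts.length : Nat) : Int) 1).foldl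
        (stepB_scan2 c ts
          ((PySem.List.pyRange 1 ((ts.length : Nat) : Int) 1).foldl
            (stepB_scan1 ((List.range ts.length).map (pv ts c)))
            (PySem.List.pyGetD ((List.range ts.length).map (pv ts c)) 0 0, 0, none)))
        (0, none)) := by
    have h := loop2_spec ts c hne h1 (ts.length - 1) (by omega)
    rw [hlen1] at h
    exact h
  obtain ⟨bi, bv, hst1, hst2, hbiK, hgbi, hlb, hfirst⟩ := h2
  obtain ⟨hKlt, hKlb, hKfirst⟩ := chooseIdx_spec (c := c) hne
  have hbieq : bi = chooseIdx ts c := by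
    rcases Nat.lt_trichotomy bi (chooseIdx ts c) with h | h | h
    · have ha := hKfirst bi h
      have hb := hlb (chooseIdx ts c) hKlt
      omega
    · exact h
    · have ha := hfirst (chooseIdx ts c) h
      have hb := hKlb bi hbiK
      omega
  rw [hst1, hbieq]
  simp only [PySem.List.pySetD_natCast, PySem.List.pyGetD_natCast]

lemma stepAB {ts c : List Int} (hne : ts ≠ []) (hlen : c.length = ts.length) :
    stepA ts c = stepB ts c := by
  rw [stepA_eq_choose hlen, stepB_eq_choose hne]

lemma foldl_const_iterate {β : Type} (f : List Int → List Int) (l : List β) (a : List Int) :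
    l.foldl (fun x _ => f x) a = f^[l.length] a := by
  induction l generalizing a with
  | nil => rfl
  | cons x xs ih => simp [List.foldl_cons, ih, Function.iterate_succ_apply]

lemma count0_eq (m : Nat) :
    (PySem.List.pyRange 0 (m : Int) 1).map (fun _ => (0 : Int)) = List.replicate m 0 := by
  rw [PySem.List.pyRange_zero_natCast, List.map_map]
  simp [Function.comp_def, List.map_const']

lemma iter_eq (ts : List Int) (hne : ts ≠ []) (N : Nat) :
    (stepA ts)^[N] (List.replicate ts.length 0)
      = (stepB ts)^[N] (List.replicate ts.length 0) ∧
    ((stepB ts)^[N] (List.replicate ts.length 0)).length = ts.length := by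
  induction N with
  | zero => simp
  | succ N ih =>
    rw [Function.iterate_succ_apply', Function.iterate_succ_apply']
    constructor
    · rw [ih.1]
      exact stepAB hne ih.2
    · rw [stepB_eq_choose hne]
      simp [ih.2]

-- ===== VERDICT (by name: the statement is the Claim_ definition above) =====
theorem solution_spec : Claim_equal_solution := by
  intro n times _hdom hne
  unfold Spec_solution
  set ts := PySem.List.sorted times (fun x => x) false with htsdef
  have hne' : ts ≠ [] := by
    rw [htsdef, Ne, PySem.List.sorted_eq_nil_iff]
    exact hne
  unfold solution solution_alt
  rw [← htsdef]
  dsimp only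
  simp only [count0_eq ts.length]
  rw [foldl_const_iterate (stepA ts), foldl_const_iterate (stepB ts),
    PySem.List.length_pyRange_one, PySem.List.length_pyRange_one]
  have hN : (n + 1 - 1).toNat = (n - 0).toNat := by omega
  rw [hN, (iter_eq ts hne' ((n - 0).toNat)).1]
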